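-- pv_equiv track=rewrite | github.com/aviciot/omni2-bridge | mcp-pt-service/recon.py | _top_severity
-- ===== SOURCE A (Python) =====
-- from typing import Any, Dict, List, Optional, Tuple
--
-- def _top_severity(param_hits: List[Dict], is_destructive: bool) -> str:
--     severities = [h["severity"] for h in param_hits]
--     if "critical" in severities:
--         return "critical"
--     if "high" in severities or is_destructive:
--         return "high"
--     if "medium" in severities:
--         return "medium"
--     return "low"
-- ===== SOURCE B (Python) =====
-- def _top_severity(param_hits, is_destructive):
--     rank = {"critical": 3, "high": 2, "medium": 1}
--     top = max((rank.get(h["severity"], 0) for h in param_hits), default=0)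
--     top = max(top, 2 if is_destructive else 0)
--     return ("low", "medium", "high", "critical")[top]
-- ===== Notes on version B (the rewrite author's own statement) =====
-- stated objective: simpler
-- what changed: Replaces the three membership scans over a built severities list by a single max-of-ranks pass with a rank dict, capping is_destructive at rank 2 and mapping the final rank back to its label.
import Mathlib
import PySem

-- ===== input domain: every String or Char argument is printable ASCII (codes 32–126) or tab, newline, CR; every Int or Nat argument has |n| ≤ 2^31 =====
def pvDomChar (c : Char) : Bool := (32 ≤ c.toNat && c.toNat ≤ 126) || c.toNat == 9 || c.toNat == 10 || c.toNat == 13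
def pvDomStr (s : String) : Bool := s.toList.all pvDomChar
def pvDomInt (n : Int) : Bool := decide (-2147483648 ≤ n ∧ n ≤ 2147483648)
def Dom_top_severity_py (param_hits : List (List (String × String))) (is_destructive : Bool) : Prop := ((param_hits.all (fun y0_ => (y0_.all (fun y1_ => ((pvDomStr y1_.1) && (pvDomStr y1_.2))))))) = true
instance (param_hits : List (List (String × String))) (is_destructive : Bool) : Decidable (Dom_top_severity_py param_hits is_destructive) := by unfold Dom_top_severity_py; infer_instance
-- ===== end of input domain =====

-- B replaces A's three membership scans over a built severities list by one max-of-ranks pass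
-- with a rank table, then maps the final rank back to its label (objective: simpler).


-- ===== PORT A =====
-- h["severity"]: first-match association-list lookup; Pre_ guarantees the key exists,
-- so the `.getD ""` default is never reached on admitted inputs.
def top_severity_py (param_hits : List (List (String × String))) (is_destructive : Bool) : String :=
  let severities := param_hits.map (fun h => (h.lookup "severity").getD "")
  if severities.contains "critical" then "critical"
  else if severities.contains "high" || is_destructive then "high"
  else if severities.contains "medium" then "medium"
  else "low"

-- ===== PORT B =====
-- rank.get(h["severity"], 0)  (same key lookup as A; Pre_ guarantees it succeeds)
def pvRankOf (h : List (String × String)) : Int :=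
  PySem.Dict.getD (PySem.Dict.ofList [("critical", 3), ("high", 2), ("medium", 1)])
    ((h.lookup "severity").getD "") 0

def top_severity_py_alt (param_hits : List (List (String × String))) (is_destructive : Bool) : String :=
  let top := param_hits.foldl (fun acc h => max acc (pvRankOf h)) 0
  let top2 := max top (if is_destructive then (2 : Int) else 0)
  (PySem.List.pyGet? ["low", "medium", "high", "critical"] top2).getD ""

-- ===== PRECONDITION & SPEC =====
-- Pre_ excludes hits without a "severity" key, on which the Python A raises KeyError.
def Pre_top_severity_py (param_hits : List (List (String × String))) (is_destructive : Bool) : Prop :=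
  ∀ h ∈ param_hits, (h.lookup "severity").isSome = true
instance (param_hits : List (List (String × String))) (is_destructive : Bool) : Decidable (Pre_top_severity_py param_hits is_destructive) := by unfold Pre_top_severity_py; infer_instance

def pvWitness_top_severity_py : (List (List (String × String))) × Bool :=
  ([[("severity", "high")], [("severity", "low")]], false)

def Spec_top_severity_py (param_hits : List (List (String × String))) (is_destructive : Bool) (out : String) : Prop := out = top_severity_py_alt param_hits is_destructive
instance (param_hits : List (List (String × String))) (is_destructive : Bool) (out : String) : Decidable (Spec_top_severity_py param_hits is_destructive out) := by unfold Spec_top_severity_py; infer_instance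

-- ===== CLAIM (what is proved, stated in full; the proofs are below) =====
def Claim_equal_top_severity_py : Prop := ∀ (param_hits : List (List (String × String))) (is_destructive : Bool), Dom_top_severity_py param_hits is_destructive → Pre_top_severity_py param_hits is_destructive → Spec_top_severity_py param_hits is_destructive (top_severity_py param_hits is_destructive)

-- ===== LEMMAS AND PROOFS =====

-- the severity string of a hit, as both ports read it
def pvSevOf (h : List (String × String)) : String := (h.lookup "severity").getD ""

-- the rank B's table assigns to a severity string
def pvRankStr (s : String) : Int :=
  if s = "critical" then 3 else if s = "high" then 2 else if s = "medium" then 1 else 0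

-- A's three membership tests, folded into the single rank B's pass computes
def pvListRank (l : List (List (String × String))) : Int :=
  if (l.map pvSevOf).contains "critical" then 3
  else if (l.map pvSevOf).contains "high" then 2
  else if (l.map pvSevOf).contains "medium" then 1
  else 0

lemma pvRankOf_eq (h : List (String × String)) : pvRankOf h = pvRankStr (pvSevOf h) := by
  show PySem.Dict.getD (PySem.Dict.mk [("critical", (3:Int)), ("high", 2), ("medium", 1)])
    (pvSevOf h) 0 = _
  simp only [PySem.Dict.getD, PySem.Dict.get?_mk_cons, pvRankStr]
  split_ifs <;> simp_all <;> rfl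

lemma pvListRank_cons (h : List (String × String)) (t : List (List (String × String))) :
    pvListRank (h :: t) = max (pvRankStr (pvSevOf h)) (pvListRank t) := by
  unfold pvListRank pvRankStr
  simp only [List.map_cons, List.contains_cons, Bool.or_eq_true, beq_iff_eq]
  by_cases s1 : "critical" = pvSevOf h <;> by_cases s2 : "high" = pvSevOf h <;>
    by_cases s3 : "medium" = pvSevOf h <;>
      simp_all [eq_comm] <;> split_ifs <;> omega

lemma pvFold_eq (l : List (List (String × String))) :
    ∀ acc : Int, 0 ≤ acc →
      l.foldl (fun acc h => max acc (pvRankStr (pvSevOf h))) acc = max acc (pvListRank l) := by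
  induction l with
  | nil =>
    intro acc hacc
    simp only [List.foldl_nil, pvListRank, List.map_nil, List.contains_nil,
      if_neg Bool.false_ne_true]
    omega
  | cons h t ih =>
    intro acc hacc
    have hr : 0 ≤ pvRankStr (pvSevOf h) := by unfold pvRankStr; split_ifs <;> norm_num
    simp only [List.foldl_cons]
    rw [ih _ (by omega), pvListRank_cons]
    omega

-- ===== VERDICT (by name: the statement is the Claim_ definition above) =====
theorem top_severity_py_spec : Claim_equal_top_severity_py := by
  intro param_hits is_destructive _hDom _hPre
  unfold Spec_top_severity_py top_severity_py top_severity_py_alt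
  simp only [pvRankOf_eq]
  rw [pvFold_eq param_hits 0 le_rfl]
  show (if (param_hits.map pvSevOf).contains "critical" then "critical"
    else if (param_hits.map pvSevOf).contains "high" || is_destructive then "high"
    else if (param_hits.map pvSevOf).contains "medium" then "medium" else "low") = _
  unfold pvListRank
  cases hc1 : (param_hits.map pvSevOf).contains "critical" <;>
    cases hc2 : (param_hits.map pvSevOf).contains "high" <;>
      cases hc3 : (param_hits.map pvSevOf).contains "medium" <;>
        cases is_destructive <;>
          simp only [Bool.or_false, Bool.or_true, if_neg Bool.false_ne_true, if_pos rfl] <;> rfl
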